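-- pv_equiv track=rewrite | github.com/kbunggul/PythonPractice | lvl3/Pass/Scale.py | solution
-- ===== SOURCE A (Python) =====
-- def solution(weight):
--     maxValue = max(weight)
--     sumValue = sum(weight)
--     weightSet = set(weight)
--
--     if 1 not in weight:
--         return 1
--
--     value = 1
--     sumValue = weight.count(1)
--
--     while True:
--         tmp = [i for i in weight if i <= sumValue+1]
--         if sum(tmp)+1 != sumValue:
--             value = max(tmp)
--             sumValue = sum(tmp) + 1
--         else:
--             return sum(tmp) +1
-- ===== SOURCE B (Python) =====
-- def solution(weight):
--     if 1 not in weight: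
--         return 1
--     ws = sorted(weight)
--     s = weight.count(1)
--     acc = 0
--     j = 0
--     n = len(ws)
--     while True:
--         while j < n and ws[j] <= s + 1:
--             acc += ws[j]
--             j += 1
--         if acc + 1 == s:
--             return s
--         s = acc + 1
-- ===== Notes on version B (the rewrite author's own statement) =====
-- stated objective: faster
-- what changed: B sorts the weights once and runs the fixpoint iteration as a single forward pass with a running prefix sum, instead of A's re-filtering and re-summing the whole list on every iteration.
-- outside the precondition, e.g. on solution([]): A raises ValueError, B returns 1; on solution([1, -5]): A returns -4, B returns -3; on solution([1, -1, -3]): A does not finish within the time limit, B returns -2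
import Mathlib
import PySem

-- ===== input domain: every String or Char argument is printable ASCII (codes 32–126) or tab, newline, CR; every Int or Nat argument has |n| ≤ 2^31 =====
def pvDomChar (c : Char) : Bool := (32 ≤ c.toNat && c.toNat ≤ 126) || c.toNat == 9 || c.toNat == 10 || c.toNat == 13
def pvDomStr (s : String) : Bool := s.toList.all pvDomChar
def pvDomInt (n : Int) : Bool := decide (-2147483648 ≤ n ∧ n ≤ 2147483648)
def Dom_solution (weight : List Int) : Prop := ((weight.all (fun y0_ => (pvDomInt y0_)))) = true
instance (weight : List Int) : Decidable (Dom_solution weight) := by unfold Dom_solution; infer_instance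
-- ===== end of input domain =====

-- B replaces A's repeated full-list filter scans by one sort plus a single forward pass with a
-- running prefix sum (the objective: faster). Return-value equivalence only; neither version
-- mutates its argument.

-- ===== PORT A =====
-- A's 'while True' loop, carried on fuel to make it total; on every input admitted by
-- Pre_solution the loop returns within weight.length + 1 iterations, so the supplied fuel
-- weight.length + 2 is never exhausted there. 'value = max(tmp)' is dead in Python (never
-- returned) and is dropped; on Pre_ inputs tmp is never empty, so max(tmp) cannot raise.
def pvLoopA (weight : List Int) (fuel : Nat) (sumValue : Int) : Int :=
  match fuel with
  | 0 => 0
  | Nat.succ fuel =>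
    let tmp := weight.filter (fun i => decide (i ≤ sumValue + 1))
    if tmp.sum + 1 ≠ sumValue then
      pvLoopA weight fuel (tmp.sum + 1)
    else
      tmp.sum + 1

def solution (weight : List Int) : Int :=
  match PySem.List.max? weight (fun x => x) with   -- max(weight): ValueError on [] (excluded by Pre_)
  | none => 0
  | some _maxValue =>
    if ¬ (1 ∈ weight) then 1
    else pvLoopA weight (weight.length + 2) ((PySem.List.count weight 1 : Nat) : Int)

-- ===== PORT B =====
-- the inner 'while j < n and ws[j] <= s + 1' pass: consume the sorted remainder into the running sum
def pvAdvance : List Int → Int → Int → List Int × Int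
  | [], acc, _ => ([], acc)
  | x :: rest, acc, s => if x ≤ s + 1 then pvAdvance rest (acc + x) s else (x :: rest, acc)

def pvLoopB (fuel : Nat) (rest : List Int) (acc s : Int) : Int :=
  match fuel with
  | 0 => 0
  | Nat.succ fuel =>
    let p := pvAdvance rest acc s
    if p.2 + 1 = s then s
    else pvLoopB fuel p.1 p.2 (p.2 + 1)

def solution_alt (weight : List Int) : Int :=
  if ¬ (1 ∈ weight) then 1
  else
    pvLoopB (weight.length + 2) (PySem.List.sorted weight (fun x => x)) 0
      ((PySem.List.count weight 1 : Nat) : Int)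

-- ===== PRECONDITION & SPEC =====
-- Pre_ excludes the empty list, on which A raises ValueError (max([])), and — when 1 is present —
-- lists with a negative weight: there A's fixpoint iteration diverges (e.g. [1, -1, -3]) or
-- raises ValueError on max of an emptied filter (e.g. [-4, -4, 1]) on many inputs, and on the
-- others returns a value that depends on the iteration's landing point, which B does not
-- reproduce.
def Pre_solution (weight : List Int) : Prop :=
  weight ≠ [] ∧ ((1 ∈ weight) → ∀ x ∈ weight, 0 ≤ x)
instance (weight : List Int) : Decidable (Pre_solution weight) := by
  unfold Pre_solution; infer_instance
def pvWitness_solution : List Int := [1, 2, 5]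

def Spec_solution (weight : List Int) (out : Int) : Prop := out = solution_alt weight
instance (weight : List Int) (out : Int) : Decidable (Spec_solution weight out) := by
  unfold Spec_solution; infer_instance

-- ===== CLAIM (what is proved, stated in full; the proofs are below) =====
def Claim_equal_solution : Prop :=
  ∀ (weight : List Int), Dom_solution weight → Pre_solution weight →
    Spec_solution weight (solution weight)

-- ===== LEMMAS AND PROOFS =====

-- the inner pass consumes exactly the (≤ s+1)-prefix of the remainder
lemma pvAdvance_spec (rest : List Int) (acc s : Int) :
    pvAdvance rest acc s =
      (rest.dropWhile (fun x => decide (x ≤ s + 1)),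
       acc + (rest.takeWhile (fun x => decide (x ≤ s + 1))).sum) := by
  induction rest generalizing acc with
  | nil => simp [pvAdvance]
  | cons x t ih =>
    by_cases h : x ≤ s + 1
    · simp [pvAdvance, h, ih]; ring
    · simp [pvAdvance, h]

lemma takeWhile_of_all {l : List Int} {p : Int → Bool} (h : ∀ x ∈ l, p x = true) (t : List Int) :
    (l ++ t).takeWhile p = l ++ t.takeWhile p := by
  induction l with
  | nil => simp
  | cons x r ih =>
    simp only [List.cons_append, List.takeWhile_cons, h x (by simp)]
    simp [ih (fun y hy => h y (by simp [hy]))]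

lemma dropWhile_of_all {l : List Int} {p : Int → Bool} (h : ∀ x ∈ l, p x = true) (t : List Int) :
    (l ++ t).dropWhile p = t.dropWhile p := by
  induction l with
  | nil => simp
  | cons x r ih =>
    simp only [List.cons_append, List.dropWhile_cons, h x (by simp)]
    exact ih (fun y hy => h y (by simp [hy]))

-- on a sorted list, the (≤ v)-takeWhile is the (≤ v)-filter
lemma takeWhile_eq_filter_of_sorted {l : List Int} (h : l.Pairwise (· ≤ ·)) (v : Int) :
    l.takeWhile (fun x => decide (x ≤ v)) = l.filter (fun x => decide (x ≤ v)) := by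
  induction l with
  | nil => rfl
  | cons x t ih =>
    rcases List.pairwise_cons.mp h with ⟨hx, ht⟩
    by_cases hxv : x ≤ v
    · simp [hxv, ih ht]
    · simp only [List.takeWhile_cons, List.filter_cons, decide_eq_true_eq]
      rw [if_neg hxv, if_neg hxv, List.filter_eq_nil_iff.mpr]
      intro a ha
      simp only [decide_eq_true_eq]
      exact fun hav => hxv (le_trans (hx a ha) hav)

-- filter-sum is monotone in the threshold for nonnegative lists
lemma filter_sum_mono {l : List Int} (hnn : ∀ x ∈ l, 0 ≤ x) {a b : Int} (hab : a ≤ b) :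
    (l.filter (fun x => decide (x ≤ a))).sum ≤ (l.filter (fun x => decide (x ≤ b))).sum := by
  induction l with
  | nil => simp
  | cons x t ih =>
    have hx := hnn x (by simp)
    have iht := ih (fun y hy => hnn y (by simp [hy]))
    by_cases ha : x ≤ a
    · simp [ha, le_trans ha hab]; omega
    · by_cases hb : x ≤ b
      · simp [ha, hb]; omega
      · simp [ha, hb]; omega

-- the count of 1s is at most the (≤ v)-filter sum, for nonnegative lists and 1 ≤ v
lemma count_le_filter_sum {l : List Int} (hnn : ∀ x ∈ l, 0 ≤ x) {v : Int} (hv : 1 ≤ v) :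
    ((l.count 1 : Nat) : Int) ≤ (l.filter (fun x => decide (x ≤ v))).sum := by
  induction l with
  | nil => simp
  | cons x t ih =>
    have hx := hnn x (by simp)
    have iht := ih (fun y hy => hnn y (by simp [hy]))
    by_cases h1 : x = 1
    · subst h1; simp [hv]; omega
    · by_cases hxv : x ≤ v
      · simp [h1, hxv]; omega
      · simpa [h1, hxv] using iht

-- main simulation: A's fixpoint loop equals B's sorted single pass
lemma pv_main (weight : List Int) (hnn : ∀ x ∈ weight, 0 ≤ x) :
    ∀ (fuel : Nat) (s c : Int), c ≤ s + 1 →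
      s ≤ (weight.filter (fun x => decide (x ≤ s + 1))).sum + 1 →
      pvLoopA weight fuel s =
        pvLoopB fuel
          ((PySem.List.sorted weight (fun x => x)).dropWhile (fun x => decide (x ≤ c)))
          (((PySem.List.sorted weight (fun x => x)).takeWhile (fun x => decide (x ≤ c))).sum)
          s := by
  intro fuel
  induction fuel with
  | zero => intro s c _ _; rfl
  | succ fuel ih =>
    intro s c hc hJ
    have hperm := PySem.List.sorted_perm weight (fun x => x) false
    have hpw : (PySem.List.sorted weight (fun x => x)).Pairwise (· ≤ ·) :=
      PySem.List.sorted_pairwise weight (fun x => x)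
    set ws := PySem.List.sorted weight (fun x => x) with hws
    have hall : ∀ x ∈ ws.takeWhile (fun x => decide (x ≤ c)), (fun x => decide (x ≤ s + 1)) x = true := by
      intro x hx
      have := List.mem_takeWhile_imp hx
      simp only [decide_eq_true_eq] at this ⊢
      omega
    have hsplit := List.takeWhile_append_dropWhile
      (p := fun x => decide (x ≤ c)) (l := ws)
    -- the B-side advance lands on the (≤ s+1)-prefix of the whole sorted list
    have hdrop : (ws.dropWhile (fun x => decide (x ≤ c))).dropWhile (fun x => decide (x ≤ s + 1))
        = ws.dropWhile (fun x => decide (x ≤ s + 1)) := by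
      conv_rhs => rw [← hsplit]
      rw [dropWhile_of_all hall]
    have htake : (ws.takeWhile (fun x => decide (x ≤ c))).sum
          + ((ws.dropWhile (fun x => decide (x ≤ c))).takeWhile (fun x => decide (x ≤ s + 1))).sum
        = (ws.takeWhile (fun x => decide (x ≤ s + 1))).sum := by
      conv_rhs => rw [← hsplit]
      rw [takeWhile_of_all hall, List.sum_append]
    have hfs : (ws.takeWhile (fun x => decide (x ≤ s + 1))).sum
        = (weight.filter (fun x => decide (x ≤ s + 1))).sum := by
      rw [takeWhile_eq_filter_of_sorted hpw]
      exact List.Perm.sum_eq (List.Perm.filter _ hperm)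
    set a := (weight.filter (fun x => decide (x ≤ s + 1))).sum with ha
    show pvLoopA weight (fuel + 1) s = _
    rw [pvLoopA, pvLoopB]
    simp only [pvAdvance_spec, hdrop, htake]
    rw [hfs]
    by_cases heq : a + 1 = s
    · rw [if_neg (by omega), if_pos heq]
      omega
    · rw [if_pos (by omega), if_neg heq]
      have hmono : a ≤ (weight.filter (fun x => decide (x ≤ a + 1 + 1))).sum := by
        have := filter_sum_mono hnn (a := s + 1) (b := a + 1 + 1) (by omega)
        omega
      have := ih (a + 1) (s + 1) (by omega) (by omega)
      rw [hfs] at this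
      rw [← ha]
      exact this

-- on a nonnegative list, nothing is ≤ -1: the initial B state is the whole sorted list
lemma drop_neg_one {l : List Int} (hnn : ∀ x ∈ l, 0 ≤ x) :
    l.dropWhile (fun x => decide (x ≤ (-1 : Int))) = l := by
  cases l with
  | nil => rfl
  | cons x t =>
    have := hnn x (by simp)
    simp [List.dropWhile_cons]
    omega

lemma take_neg_one {l : List Int} (hnn : ∀ x ∈ l, 0 ≤ x) :
    l.takeWhile (fun x => decide (x ≤ (-1 : Int))) = [] := by
  cases l with
  | nil => rfl
  | cons x t =>
    have := hnn x (by simp)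
    simp [List.takeWhile_cons]
    omega

-- ===== VERDICT (by name: the statement is the Claim_ definition above) =====
theorem solution_spec : Claim_equal_solution := by
  intro weight _hdom hpre
  rcases hpre with ⟨hne, hnn1⟩
  unfold Spec_solution solution solution_alt
  cases hmax : PySem.List.max? weight (fun x => x) with
  | none => exact absurd ((PySem.List.max?_eq_none_iff weight _).mp hmax) hne
  | some m =>
    by_cases h1 : 1 ∈ weight
    · have hnn := hnn1 h1
      have hnns : ∀ x ∈ PySem.List.sorted weight (fun x => x), 0 ≤ x := by
        intro x hx
        exact hnn x ((PySem.List.mem_sorted weight (fun x => x) false x).mp hx)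
      have hcnt : (0 : Int) ≤ ((weight.count 1 : Nat) : Int) := by positivity
      have hJ : ((weight.count 1 : Nat) : Int)
          ≤ (weight.filter (fun x => decide (x ≤ ((weight.count 1 : Nat) : Int) + 1))).sum + 1 := by
        have := count_le_filter_sum hnn (v := ((weight.count 1 : Nat) : Int) + 1) (by omega)
        omega
      have := pv_main weight hnn (weight.length + 2)
        ((weight.count 1 : Nat) : Int) (-1) (by omega) hJ
      rw [drop_neg_one hnns, take_neg_one hnns] at this
      simpa [h1, PySem.List.count] using this
    · simp [h1]
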